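-- pv_equiv track=rewrite | github.com/dcmouser/cnpaperplay | source/cno.py | renderTrackBoxes
-- ===== SOURCE A (Python) =====
-- def renderTrackBoxes(boxcount):
--     """Render some unicode checkboxes."""
--     hretv = '<cspan class="cdboxes">'
--     xcount = 0
--     xspacer = 3
--     for i in range(0,boxcount):
--         hretv += '&#10066;'
--         xcount += 1
--         if (xcount == xspacer):
--             hretv += ' '
--             xcount = 0
--     hretv += '</span>'
--     return hretv
-- ===== SOURCE B (Python) =====
-- def renderTrackBoxes(boxcount):
--     """Render some unicode checkboxes."""
--     box = '&#10066;'
--     n = boxcount if boxcount > 0 else 0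
--     body = (box * 3 + ' ') * (n // 3) + box * (n % 3)
--     return '<cspan class="cdboxes">' + body + '</span>'
-- ===== Notes on version B (the rewrite author's own statement) =====
-- stated objective: simpler
-- what changed: Replaces the per-box counter loop by a closed-form string multiplication: (box*3+' ')*(n//3) + box*(n%3), with n clamped at 0.
import Mathlib
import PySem

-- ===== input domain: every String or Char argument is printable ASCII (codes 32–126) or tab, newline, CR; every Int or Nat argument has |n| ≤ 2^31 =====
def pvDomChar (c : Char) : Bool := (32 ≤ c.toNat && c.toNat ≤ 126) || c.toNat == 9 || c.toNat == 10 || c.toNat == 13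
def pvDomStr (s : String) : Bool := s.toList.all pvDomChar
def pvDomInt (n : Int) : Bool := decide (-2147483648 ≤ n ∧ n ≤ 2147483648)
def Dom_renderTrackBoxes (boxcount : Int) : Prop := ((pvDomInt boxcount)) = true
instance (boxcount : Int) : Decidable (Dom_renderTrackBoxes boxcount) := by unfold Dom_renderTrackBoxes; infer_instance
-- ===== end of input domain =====

-- B replaces A's per-box counter loop by a closed-form grouping (box*3+' ')*(n//3) + box*(n%3); objective: simpler.


-- ===== PORT A =====
def renderTrackBoxes (boxcount : Int) : String :=
  let st := (PySem.List.pyRange 0 boxcount 1).foldl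
    (fun (st : String × Int) _ =>
      let h := st.1 ++ "&#10066;"
      let x := st.2 + 1
      if x == 3 then (h ++ " ", 0) else (h, x))
    ("<cspan class=\"cdboxes\">", 0)
  st.1 ++ "</span>"

-- ===== PORT B =====
-- Python's 's * k' (string repetition), ported by hand
def strRepeat (s : String) : Nat → String
  | 0 => ""
  | k + 1 => strRepeat s k ++ s

def renderTrackBoxes_alt (boxcount : Int) : String :=
  let box := "&#10066;"
  let n : Nat := if boxcount > 0 then boxcount.toNat else 0
  let body := strRepeat (box ++ box ++ box ++ " ") (n / 3) ++ strRepeat box (n % 3)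
  "<cspan class=\"cdboxes\">" ++ body ++ "</span>"

-- ===== PRECONDITION & SPEC =====
def Spec_renderTrackBoxes (boxcount : Int) (out : String) : Prop := out = renderTrackBoxes_alt boxcount
instance (boxcount : Int) (out : String) : Decidable (Spec_renderTrackBoxes boxcount out) := by unfold Spec_renderTrackBoxes; infer_instance

-- ===== CLAIM (what is proved, stated in full; the proofs are below) =====
def Claim_equal_renderTrackBoxes : Prop := ∀ (boxcount : Int), Dom_renderTrackBoxes boxcount → Spec_renderTrackBoxes boxcount (renderTrackBoxes boxcount)

-- ===== LEMMAS AND PROOFS =====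

-- the body of B for m boxes, as a function of a Nat count
def pvBody (m : Nat) : String :=
  strRepeat ("&#10066;" ++ "&#10066;" ++ "&#10066;" ++ " ") (m / 3) ++ strRepeat "&#10066;" (m % 3)

-- A's loop step (elements of the range are ignored)
def pvStep (st : String × Int) : String × Int :=
  let h := st.1 ++ "&#10066;"
  let x := st.2 + 1
  if x == 3 then (h ++ " ", 0) else (h, x)

theorem pvFoldl_eq_iterate (l : List Int) (s : String × Int) :
    l.foldl (fun (st : String × Int) _ =>
      let h := st.1 ++ "&#10066;"
      let x := st.2 + 1
      if x == 3 then (h ++ " ", 0) else (h, x)) s = pvStep^[l.length] s := by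
  induction l generalizing s with
  | nil => rfl
  | cons a t ih =>
      simp only [List.foldl_cons, List.length_cons, Function.iterate_succ_apply]
      exact ih _

theorem pvIterate_closed (h : String) : ∀ m : Nat,
    pvStep^[m] (h, 0) = (h ++ pvBody m, ((m % 3 : Nat) : Int)) := by
  intro m
  induction m with
  | zero => simp [pvBody, strRepeat]
  | succ m ih =>
      rw [Function.iterate_succ_apply', ih]
      obtain ⟨q, r, hr, hm⟩ : ∃ q r, r < 3 ∧ m = 3 * q + r := ⟨m / 3, m % 3, by omega, by omega⟩
      subst hm
      interval_cases r
      · have h1 : (3 * q) % 3 = 0 := by omega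
        have h2 : (3 * q + 1) % 3 = 1 := by omega
        have h3 : (3 * q + 1) / 3 = 3 * q / 3 := by omega
        simp [pvStep, pvBody, h1, h2, h3, strRepeat, String.append_assoc]
      · have h1 : (3 * q + 1) % 3 = 1 := by omega
        have h2 : (3 * q + 2) % 3 = 2 := by omega
        have h3 : (3 * q + 2) / 3 = (3 * q + 1) / 3 := by omega
        simp [pvStep, pvBody, h1, h2, h3, strRepeat, String.append_assoc]
      · have h1 : (3 * q + 2) % 3 = 2 := by omega
        have h2 : (3 * q + 3) % 3 = 0 := by omega
        have h3 : (3 * q + 3) / 3 = (3 * q + 2) / 3 + 1 := by omega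
        simp [pvStep, pvBody, h1, h2, h3, strRepeat, String.append_assoc]

-- ===== VERDICT (by name: the statement is the Claim_ definition above) =====
theorem renderTrackBoxes_spec : Claim_equal_renderTrackBoxes := by
  intro boxcount _
  unfold Spec_renderTrackBoxes renderTrackBoxes renderTrackBoxes_alt
  rw [pvFoldl_eq_iterate, pvIterate_closed]
  have hlen : (PySem.List.pyRange 0 boxcount 1).length = (boxcount - 0).toNat :=
    PySem.List.length_pyRange_one 0 boxcount
  rw [hlen]
  by_cases hp : boxcount > 0
  · simp [hp, pvBody, String.append_assoc]
  · have h0 : boxcount.toNat = 0 := by omega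
    have h1 : (boxcount - 0).toNat = 0 := by omega
    simp [hp, h0, pvBody, strRepeat]
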